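-- pv_equiv track=rewrite | github.com/JnxF/advent-of-code-2020 | day20.py | larotacion
-- ===== SOURCE A (Python) =====
-- def larotacion(r):
--     def Transposed(tile):
--         return list("".join(row) for row in zip(*tile))
--
--     def Reversed_tile(tile):
--         return ["".join(reversed(row)) for row in tile]
--
--     def Rotations(tile):
--         ans = [tile]
--         for _ in range(3):
--             ans.append(Reversed_tile(Transposed(ans[-1])))
--         return ans
--
--     def Group(tile):
--         return Rotations(tile) + Rotations(Transposed(tile))
--
--     return Group(r)
-- ===== SOURCE B (Python) =====
-- def larotacion(r):
--     def T(x):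
--         k = min(map(len, x), default=0)
--         return ["".join(row[i] for row in x) for i in range(k)]
--
--     def Rev(x):
--         return [row[::-1] for row in x]
--
--     t = T(r)
--     tt = T(t)
--     return [
--         r,              # identity
--         Rev(t),         # 90 degrees CW
--         Rev(tt[::-1]),  # 180 degrees
--         t[::-1],        # 270 degrees
--         t,              # transpose
--         Rev(tt),        # transpose + 90 CW
--         Rev(t[::-1]),   # transpose + 180
--         tt[::-1],       # transpose + 270
--     ]
-- ===== Notes on version B (the rewrite author's own statement) =====
-- stated objective: faster
-- what changed: B computes each of the 8 dihedral orientations as a standalone closed composition of two primitives (an index-built transpose applied twice in total, plus per-row and row-order slice reversals) instead of A's cumulative chain that feeds each 90-degree rotation into the next (7 zip-transposes).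
import Mathlib
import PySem

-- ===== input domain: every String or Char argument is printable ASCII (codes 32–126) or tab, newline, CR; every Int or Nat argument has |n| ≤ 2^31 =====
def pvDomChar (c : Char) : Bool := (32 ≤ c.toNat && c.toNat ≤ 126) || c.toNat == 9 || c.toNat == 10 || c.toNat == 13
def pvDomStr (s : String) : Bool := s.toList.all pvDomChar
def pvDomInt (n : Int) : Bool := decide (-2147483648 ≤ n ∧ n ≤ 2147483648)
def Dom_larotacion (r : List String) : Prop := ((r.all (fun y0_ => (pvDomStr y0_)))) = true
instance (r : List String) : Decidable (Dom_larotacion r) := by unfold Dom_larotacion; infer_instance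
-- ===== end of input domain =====

-- B computes each of the 8 dihedral orientations as a standalone closed composition of an
-- index-built transpose (applied twice in total) plus per-row / row-order reversals, instead
-- of A's cumulative chain feeding each 90° rotation into the next (7 zip-transposes);
-- objective: alternative decomposition, same output byte-for-byte.

-- ===== PORT A =====
-- zip(*tile) joined to strings: columns up to the shortest row (char level)
def transposeCh (rows : List (List Char)) : List (List Char) :=
  if _h : rows = [] ∨ rows.any List.isEmpty then []
  else (rows.map (fun r => r.headD ' ')) :: transposeCh (rows.map List.tail)
termination_by (rows.headD []).length
decreasing_by
  simp only [not_or] at _h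
  obtain ⟨h1, h2⟩ := _h
  cases rows with
  | nil => exact absurd rfl h1
  | cons a l =>
    simp only [List.any_cons, Bool.or_eq_true] at h2
    cases a with
    | nil => simp at h2
    | cons x xs => simp [List.headD]

-- Transposed(tile) = list("".join(row) for row in zip(*tile))
def pyTranspose (x : List String) : List String :=
  (transposeCh (x.map String.toList)).map String.ofList

-- Reversed_tile(tile) = ["".join(reversed(row)) for row in tile]
def pyRevRows (x : List String) : List String :=
  x.map (fun s => String.ofList s.toList.reverse)

-- Rotations(tile): ans = [tile]; 3× append Reversed_tile(Transposed(ans[-1]))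
def pyRotations (tile : List String) : List (List String) :=
  (List.range 3).foldl
    (fun ans _ => ans ++ [pyRevRows (pyTranspose (ans.getLast!))]) [tile]

def larotacion (r : List String) : List (List String) :=
  pyRotations r ++ pyRotations (pyTranspose r)

-- ===== PORT B =====
-- k = min(map(len, x), default=0)
def altMinLen (x : List String) : Nat :=
  ((x.map (fun s => s.toList.length)).min?).getD 0

-- T(x) = ["".join(row[i] for row in x) for i in range(k)]  (index-built transpose)
def altT (x : List String) : List String :=
  (List.range (altMinLen x)).map
    (fun i => String.ofList (x.map (fun row => row.toList.getD i ' ')))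

-- Rev(x) = [row[::-1] for row in x]   (s[::-1] via the PySem slice primitive, exact)
def altRev (x : List String) : List String :=
  x.map (fun s => (PySem.Str.slice? s none none (-1)).getD "")

-- x[::-1] on a list of rows
def altFlip (x : List String) : List String :=
  (PySem.List.slice? x none none (-1)).getD []

def larotacion_alt (r : List String) : List (List String) :=
  let t := altT r
  let tt := altT t
  [ r,                     -- identity
    altRev t,              -- 90° CW
    altRev (altFlip tt),   -- 180°
    altFlip t,             -- 270°
    t,                     -- transpose
    altRev tt,             -- transpose + 90° CW
    altRev (altFlip t),    -- transpose + 180°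
    altFlip tt ]           -- transpose + 270°

-- ===== PRECONDITION & SPEC =====
def Spec_larotacion (r : List String) (out : List (List String)) : Prop := out = larotacion_alt r
instance (r : List String) (out : List (List String)) : Decidable (Spec_larotacion r out) := by unfold Spec_larotacion; infer_instance

-- ===== CLAIM (what is proved, stated in full; the proofs are below) =====
def Claim_equal_larotacion : Prop := ∀ (r : List String), Dom_larotacion r → Spec_larotacion r (larotacion r)

-- ===== LEMMAS AND PROOFS =====

-- row-wise reversal at char level
def revc (x : List (List Char)) : List (List Char) := x.map List.reverse

-- column j of x (padded with ' ', never used out of range)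
def colFn (x : List (List Char)) (j : Nat) : List Char :=
  x.map (fun row => (row[j]?).getD ' ')

-- length of the shortest row (0 for the empty matrix)
def mnLen (x : List (List Char)) : Nat := ((x.map List.length).min?).getD 0

theorem transposeCh_nil : transposeCh [] = [] := by
  unfold transposeCh; simp

theorem mnLen_zero {x : List (List Char)} (h : mnLen x = 0) :
    x = [] ∨ x.any List.isEmpty = true := by
  cases x with
  | nil => exact Or.inl rfl
  | cons a l =>
    right
    unfold mnLen at h
    cases hm : ((a :: l).map List.length).min? with
    | none => simp at hm
    | some k =>
      rw [hm] at h; simp at h; subst h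
      obtain ⟨hk, _⟩ := List.min?_eq_some_iff.mp hm
      obtain ⟨row, hrow, hlen⟩ := List.mem_map.mp hk
      exact List.any_eq_true.mpr ⟨row, hrow, by simp [List.length_eq_zero_iff.mp hlen]⟩

theorem mnLen_succ {x : List (List Char)} {k : Nat} (h : mnLen x = k + 1) :
    x ≠ [] ∧ x.any List.isEmpty = false ∧ mnLen (x.map List.tail) = k := by
  unfold mnLen at h
  cases hm : (x.map List.length).min? with
  | none => rw [hm] at h; simp at h
  | some v =>
    rw [hm] at h; simp at h; subst h
    obtain ⟨hmem, hle⟩ := List.min?_eq_some_iff.mp hm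
    have hne : x ≠ [] := by
      rintro rfl; simp at hm
    have hnoempty : x.any List.isEmpty = false := by
      rw [Bool.eq_false_iff]
      intro hany
      obtain ⟨row, hrow, hemp⟩ := List.any_eq_true.mp hany
      have := hle row.length (List.mem_map.mpr ⟨row, hrow, rfl⟩)
      rw [List.isEmpty_iff] at hemp
      rw [hemp] at this; simp at this
    refine ⟨hne, hnoempty, ?_⟩
    unfold mnLen
    have : ((x.map List.tail).map List.length).min? = some k := by
      apply List.min?_eq_some_iff.mpr
      constructor
      · obtain ⟨row, hrow, hlen⟩ := List.mem_map.mp hmem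
        refine List.mem_map.mpr ⟨row.tail, List.mem_map.mpr ⟨row, hrow, rfl⟩, ?_⟩
        simp [List.length_tail, hlen]
      · intro b hb
        obtain ⟨trow, htrow, rfl⟩ := List.mem_map.mp hb
        obtain ⟨row, hrow, rfl⟩ := List.mem_map.mp htrow
        have := hle row.length (List.mem_map.mpr ⟨row, hrow, rfl⟩)
        simp [List.length_tail]; omega
    rw [this]; rfl

-- closed form of transposeCh on an arbitrary (possibly ragged) input
theorem transposeCh_minLen :
    ∀ (x : List (List Char)), transposeCh x = (List.range (mnLen x)).map (colFn x) := by
  have main : ∀ (N : Nat) (x : List (List Char)), mnLen x ≤ N →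
      transposeCh x = (List.range (mnLen x)).map (colFn x) := by
    intro N
    induction N with
    | zero =>
      intro x hN
      have h0 : mnLen x = 0 := Nat.le_zero.mp hN
      rw [h0, transposeCh, dif_pos (mnLen_zero h0)]
      simp
    | succ N ih =>
      intro x hN
      cases hm : mnLen x with
      | zero =>
        rw [transposeCh, dif_pos (mnLen_zero hm)]
        simp
      | succ k =>
        obtain ⟨hne, hnoempty, htl⟩ := mnLen_succ hm
        rw [transposeCh, dif_neg (by simp [hne, hnoempty])]
        have hk : mnLen (x.map List.tail) ≤ N := by omega
        rw [ih _ hk, htl]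
        have hrange : List.range (k+1) = 0 :: (List.range k).map (·+1) := by
          simpa using List.range_succ_eq_map (n := k)
        rw [hrange, List.map_cons, List.map_map]
        congr 1
        · unfold colFn
          apply List.map_congr_left
          intro a _; cases a <;> simp
        · apply List.map_congr_left
          intro j _
          unfold colFn
          rw [List.map_map]
          apply List.map_congr_left
          intro a _
          simp [List.getElem?_tail]
  exact fun x => main (mnLen x) x le_rfl

-- every row of transposeCh x has length x.length
theorem transposeCh_rect_aux :
    ∀ (N : Nat) (x : List (List Char)), (x.headD []).length ≤ N →
      ∀ row ∈ transposeCh x, row.length = x.length := by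
  intro N
  induction N with
  | zero =>
    intro x hN row hrow
    by_cases h : x = [] ∨ x.any List.isEmpty
    · rw [transposeCh, dif_pos h] at hrow; simp at hrow
    · exfalso
      simp only [not_or] at h
      obtain ⟨h1, h2⟩ := h
      cases x with
      | nil => exact h1 rfl
      | cons a l =>
        simp only [List.headD_cons] at hN
        simp only [List.any_cons, Bool.or_eq_true, not_or] at h2
        have : a = [] := List.length_eq_zero_iff.mp (Nat.le_zero.mp hN)
        exact h2.1 (by simp [this])
  | succ N ih =>
    intro x hN row hrow
    by_cases h : x = [] ∨ x.any List.isEmpty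
    · rw [transposeCh, dif_pos h] at hrow; simp at hrow
    · rw [transposeCh, dif_neg h] at hrow
      rw [List.mem_cons] at hrow
      rcases hrow with rfl | hrow
      · simp
      · have hmeas : ((x.map List.tail).headD []).length ≤ N := by
          simp only [not_or] at h
          cases x with
          | nil => exact absurd rfl h.1
          | cons a l => simp only [List.map_cons, List.headD_cons] at hN ⊢; simp [List.length_tail]; omega
        have := ih (x.map List.tail) hmeas row hrow
        simpa using this

theorem transposeCh_rect (x : List (List Char)) :
    ∀ row ∈ transposeCh x, row.length = x.length :=
  transposeCh_rect_aux (x.headD []).length x le_rfl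

theorem colFn_length (x : List (List Char)) (j : Nat) : (colFn x j).length = x.length := by
  simp [colFn]

-- closed form on a rectangular nonempty input (special case of transposeCh_minLen)
theorem transposeCh_spec {n : Nat} :
    ∀ x : List (List Char), (∀ row ∈ x, row.length = n) → x ≠ [] →
      transposeCh x = (List.range n).map (colFn x) := by
  intro x hr hx
  rw [transposeCh_minLen x]
  have : mnLen x = n := by
    cases x with
    | nil => exact absurd rfl hx
    | cons a l =>
      unfold mnLen
      have : ((a :: l).map List.length).min? = some n := by
        apply List.min?_eq_some_iff.mpr
        constructor
        · exact List.mem_map.mpr ⟨a, by simp, hr a (by simp)⟩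
        · intro b hb
          obtain ⟨row, hrow, rfl⟩ := List.mem_map.mp hb
          rw [hr row hrow]
      rw [this]; rfl
  rw [this]

-- T(Rev x) = reverse (T x) on rectangular x
theorem tc_revc {n : Nat} (x : List (List Char)) (hr : ∀ row ∈ x, row.length = n) :
    transposeCh (revc x) = (transposeCh x).reverse := by
  by_cases hx : x = []
  · subst hx; simp [revc, transposeCh_nil]
  have hrev : ∀ row ∈ revc x, row.length = n := by
    intro row hrow
    obtain ⟨a, ha, rfl⟩ := List.mem_map.mp hrow
    simp [hr a ha]
  have hxr : revc x ≠ [] := by simp [revc, List.map_eq_nil_iff]; exact hx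
  rw [transposeCh_spec _ hrev hxr, transposeCh_spec _ hr hx]
  apply List.ext_getElem
  · simp
  intro i h1 h2
  have hi : i < n := by simpa using h1
  simp only [List.getElem_map, List.getElem_range, List.getElem_reverse, List.length_map,
    List.length_range]
  unfold colFn revc
  rw [List.map_map]
  apply List.map_congr_left
  intro a ha
  have hlen := hr a ha
  have hia : i < a.length := by omega
  simp only [Function.comp_apply]
  rw [List.getElem?_reverse hia, hlen]

-- T(reverse x) = Rev (T x) on rectangular x
theorem tc_reverse {n : Nat} (x : List (List Char)) (hr : ∀ row ∈ x, row.length = n) :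
    transposeCh x.reverse = revc (transposeCh x) := by
  by_cases hx : x = []
  · subst hx; simp [revc, transposeCh_nil]
  have hrev : ∀ row ∈ x.reverse, row.length = n := by
    intro row hrow; exact hr row (List.mem_reverse.mp hrow)
  have hxr : x.reverse ≠ [] := by simp; exact hx
  rw [transposeCh_spec _ hrev hxr, transposeCh_spec _ hr hx]
  unfold revc
  rw [List.map_map]
  apply List.map_congr_left
  intro j _
  unfold colFn
  simp [List.map_reverse]

-- T(T x) = x on nonempty rectangular x with positive row length
theorem tc_tc {n : Nat} (x : List (List Char)) (hr : ∀ row ∈ x, row.length = n)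
    (hx : x ≠ []) (hn : 0 < n) : transposeCh (transposeCh x) = x := by
  rw [transposeCh_spec _ hr hx]
  have hrect : ∀ row ∈ (List.range n).map (colFn x), row.length = x.length := by
    intro row hrow
    obtain ⟨j, _, rfl⟩ := List.mem_map.mp hrow
    exact colFn_length x j
  have hne : (List.range n).map (colFn x) ≠ [] := by
    simp [List.map_eq_nil_iff, List.range_eq_nil]; omega
  rw [transposeCh_spec _ hrect hne]
  apply List.ext_getElem
  · simp
  intro i h1 h2
  simp only [List.length_map, List.length_range] at h1
  simp only [List.getElem_map, List.getElem_range]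
  unfold colFn
  rw [List.map_map]
  apply List.ext_getElem
  · simp [hr x[i] (List.getElem_mem h2)]
  intro j hj1 hj2
  simp only [List.length_map, List.length_range] at hj1
  simp only [List.getElem_map, List.getElem_range, Function.comp_apply]
  rw [List.getElem?_map, List.getElem?_eq_getElem h2]
  simp [List.getElem?_eq_getElem hj2]

theorem revc_revc (x : List (List Char)) : revc (revc x) = x := by
  simp [revc, List.map_map]

theorem revc_reverse (x : List (List Char)) : revc x.reverse = (revc x).reverse := by
  simp [revc, List.map_reverse]

-- the rotation step at char level
def rotc (x : List (List Char)) : List (List Char) := revc (transposeCh x)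

-- T (T (T c)) = T c for arbitrary c
theorem tc_tc_tc (c : List (List Char)) :
    transposeCh (transposeCh (transposeCh c)) = transposeCh c := by
  by_cases hc : c = []
  · subst hc; simp [transposeCh_nil]
  by_cases ht : transposeCh c = []
  · rw [ht, transposeCh_nil, transposeCh_nil]
  exact tc_tc (n := c.length) _ (transposeCh_rect c) ht (by
    cases c with
    | nil => exact absurd rfl hc
    | cons a l => simp)

-- the four nontrivial orientation identities
theorem rot2_eq (c : List (List Char)) :
    rotc (rotc c) = revc (transposeCh (transposeCh c)).reverse := by
  unfold rotc
  rw [tc_revc (n := c.length) _ (transposeCh_rect c)]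

theorem rot3_eq (c : List (List Char)) :
    rotc (rotc (rotc c)) = (transposeCh c).reverse := by
  have step := congrArg rotc (rot2_eq c)
  rw [step]
  unfold rotc
  set t := transposeCh c with ht
  set tt := transposeCh t with htt
  have hrtt : ∀ row ∈ revc tt, row.length = t.length := by
    intro row hrow
    obtain ⟨a, ha, rfl⟩ := List.mem_map.mp hrow
    simpa using transposeCh_rect t a ha
  calc revc (transposeCh (revc tt.reverse))
      = revc (transposeCh (revc tt).reverse) := by rw [revc_reverse]
    _ = revc (revc (transposeCh (revc tt))) := by
          rw [tc_reverse (n := t.length) _ hrtt]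
    _ = transposeCh (revc tt) := revc_revc _
    _ = (transposeCh tt).reverse := tc_revc (n := t.length) _ (transposeCh_rect t)
    _ = t.reverse := by rw [htt, ht, tc_tc_tc]

theorem rot2_t_eq (c : List (List Char)) :
    rotc (rotc (transposeCh c)) = revc (transposeCh c).reverse := by
  unfold rotc
  set t := transposeCh c with ht
  rw [tc_revc (n := t.length) _ (transposeCh_rect t)]
  rw [show transposeCh (transposeCh t) = t from by rw [ht, tc_tc_tc]]

theorem rot3_t_eq (c : List (List Char)) :
    rotc (rotc (rotc (transposeCh c))) = (transposeCh (transposeCh c)).reverse := by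
  have step := congrArg rotc (rot2_t_eq c)
  rw [step]
  unfold rotc
  set t := transposeCh c with ht
  have hrt : ∀ row ∈ revc t, row.length = c.length := by
    intro row hrow
    obtain ⟨a, ha, rfl⟩ := List.mem_map.mp hrow
    simpa using transposeCh_rect c a ha
  calc revc (transposeCh (revc t.reverse))
      = revc (transposeCh (revc t).reverse) := by rw [revc_reverse]
    _ = revc (revc (transposeCh (revc t))) := by rw [tc_reverse (n := c.length) _ hrt]
    _ = transposeCh (revc t) := revc_revc _
    _ = (transposeCh t).reverse := tc_revc (n := c.length) _ (transposeCh_rect c)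

-- lifting: both ports are images under map (map String.ofList → String) of char-level matrices
theorem pyTranspose_map (X : List (List Char)) :
    pyTranspose (X.map String.ofList) = (transposeCh X).map String.ofList := by
  simp [pyTranspose, List.map_map, Function.comp_def]

theorem pyRevRows_map (X : List (List Char)) :
    pyRevRows (X.map String.ofList) = (revc X).map String.ofList := by
  simp [pyRevRows, revc, List.map_map, Function.comp_def]

theorem reverse_map_ofList (X : List (List Char)) :
    (X.map String.ofList).reverse = X.reverse.map String.ofList := by
  simp [List.map_reverse]

-- B's index-built transpose agrees with A's zip-based one on every input
theorem altT_eq (x : List String) : altT x = pyTranspose x := by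
  unfold altT pyTranspose altMinLen
  rw [transposeCh_minLen]
  have hmn : ((x.map (fun s => s.toList.length)).min?).getD 0 = mnLen (x.map String.toList) := by
    unfold mnLen
    rw [List.map_map]
    rfl
  rw [hmn, List.map_map]
  apply List.map_congr_left
  intro i _
  unfold colFn
  simp [Function.comp_def, List.map_map, List.getD_eq_getElem?_getD]

theorem altRev_eq (x : List String) : altRev x = pyRevRows x := by
  simp [altRev, pyRevRows, PySem.Str.slice?_none_none_neg_one]

theorem altFlip_eq (x : List String) : altFlip x = x.reverse := by
  simp [altFlip, PySem.List.slice?_none_none_neg_one]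

-- A's Rotations chain written out
theorem pyRotations_eq (tile : List String) :
    pyRotations tile =
      [tile,
       pyRevRows (pyTranspose tile),
       pyRevRows (pyTranspose (pyRevRows (pyTranspose tile))),
       pyRevRows (pyTranspose (pyRevRows (pyTranspose (pyRevRows (pyTranspose tile)))))] := rfl

-- ===== VERDICT (by name: the statement is the Claim_ definition above) =====
theorem larotacion_spec : Claim_equal_larotacion := by
  intro r _
  show larotacion r = larotacion_alt r
  obtain ⟨c, rfl⟩ : ∃ c, r = c.map String.ofList :=
    ⟨r.map String.toList, by simp [List.map_map, Function.comp_def]⟩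
  unfold larotacion larotacion_alt
  simp only [altT_eq, altRev_eq, altFlip_eq]
  rw [pyRotations_eq, pyRotations_eq]
  simp only [pyTranspose_map, pyRevRows_map, reverse_map_ofList,
    List.cons_append, List.nil_append]
  have e2 := rot2_eq c
  have e3 := rot3_eq c
  have e6 := rot2_t_eq c
  have e7 := rot3_t_eq c
  simp only [rotc] at e2 e3 e6 e7
  rw [e3, e7, e6, e2]
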